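-- pv_equiv track=rewrite | github.com/cybersmurf/RealEstateAggregator | scripts/generate_final_decision.py | pick_best_analysis
-- ===== SOURCE A (Python) =====
-- def pick_best_analysis(analyses: list) -> dict | None:
--     if not analyses:
--         return None
--     # Priorita: mistral-tools > claude (desktop/local) > ostatní
--     for prefix in ["local:mistral-tools/", "claude", "local:claude/"]:
--         candidates = [a for a in analyses if (a.get("source") or "").startswith(prefix)]
--         if candidates:
--             return sorted(candidates, key=lambda a: a.get("createdAt", ""))[-1]
--     # Fallback: nejnovější
--     return sorted(analyses, key=lambda a: a.get("createdAt", ""))[-1]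
-- ===== SOURCE B (Python) =====
-- def _rank(a):
--     s = a.get("source") or ""
--     if s.startswith("local:mistral-tools/"):
--         return 0
--     if s.startswith("claude"):
--         return 1
--     if s.startswith("local:claude/"):
--         return 2
--     return 3
--
--
-- def pick_best_analysis(analyses: list) -> dict | None:
--     best = None
--     for a in analyses:
--         if best is None:
--             best = a
--         else:
--             ra, rb = _rank(a), _rank(best)
--             if ra < rb or (ra == rb and a.get("createdAt", "") >= best.get("createdAt", "")):
--                 best = a
--     return best
-- ===== Notes on version B (the rewrite author's own statement) =====
-- stated objective: alternative
-- what changed: Replaces the three filter+stable-sort+[-1] passes (and the fallback sort) by a single linear scan keeping the best element under (priority rank, createdAt) with >=-ties so the last maximum wins.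
import Mathlib
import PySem

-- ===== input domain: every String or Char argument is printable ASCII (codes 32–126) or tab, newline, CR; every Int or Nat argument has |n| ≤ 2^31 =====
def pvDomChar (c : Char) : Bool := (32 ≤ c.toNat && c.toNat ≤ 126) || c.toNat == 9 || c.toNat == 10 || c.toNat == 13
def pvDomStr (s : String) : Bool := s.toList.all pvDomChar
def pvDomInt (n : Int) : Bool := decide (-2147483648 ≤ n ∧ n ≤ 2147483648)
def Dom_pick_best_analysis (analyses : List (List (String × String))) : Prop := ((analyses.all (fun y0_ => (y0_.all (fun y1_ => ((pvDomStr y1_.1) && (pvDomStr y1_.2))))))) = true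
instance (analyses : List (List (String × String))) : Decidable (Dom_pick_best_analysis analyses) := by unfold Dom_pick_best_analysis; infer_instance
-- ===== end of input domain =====

-- B replaces A's three filter + stable-sort + [-1] passes (and fallback sort) by one linear
-- best-element scan ranked by (priority prefix, createdAt) with >=-ties so the last maximum wins.

-- ===== PORT A =====
-- dict.get(k, d) / (dict.get(k) or "") on a string-valued dict: first match in the association list, default d.
def pvGetD (a : List (String × String)) (k d : String) : String :=
  (((a.find? (fun p => p.1 == k)).map (fun p => p.2)).getD d)

-- the 'for prefix in [...]' loop of A: try each prefix in order, fall back to sorting everything.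
def pickLoopA (analyses : List (List (String × String))) : List String → Option (List (String × String))
  | [] => (PySem.List.sorted analyses (fun a => pvGetD a "createdAt" "")).getLast?
  | p :: ps =>
    let candidates := analyses.filter (fun a => PySem.Str.startswith (pvGetD a "source" "") p)
    if candidates = [] then pickLoopA analyses ps
    else (PySem.List.sorted candidates (fun a => pvGetD a "createdAt" "")).getLast?

def pick_best_analysis (analyses : List (List (String × String))) : Option (List (String × String)) :=
  if analyses = [] then none
  else pickLoopA analyses ["local:mistral-tools/", "claude", "local:claude/"]

-- ===== PORT B =====
def pvRank (a : List (String × String)) : Nat :=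
  if PySem.Str.startswith (pvGetD a "source" "") "local:mistral-tools/" then 0
  else if PySem.Str.startswith (pvGetD a "source" "") "claude" then 1
  else if PySem.Str.startswith (pvGetD a "source" "") "local:claude/" then 2
  else 3

-- loop body of B: keep the better of the current best and the next element.
def pvStep (best : Option (List (String × String))) (a : List (String × String)) :
    Option (List (String × String)) :=
  match best with
  | none => some a
  | some b =>
    if pvRank a < pvRank b ∨ (pvRank a = pvRank b ∧ pvGetD b "createdAt" "" ≤ pvGetD a "createdAt" "")
    then some a else some b

def pick_best_analysis_alt (analyses : List (List (String × String))) : Option (List (String × String)) :=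
  analyses.foldl pvStep none

-- ===== PRECONDITION & SPEC =====
def Spec_pick_best_analysis (analyses : List (List (String × String))) (out : Option (List (String × String))) : Prop := out = pick_best_analysis_alt analyses
instance (analyses : List (List (String × String))) (out : Option (List (String × String))) : Decidable (Spec_pick_best_analysis analyses out) := by unfold Spec_pick_best_analysis; infer_instance

-- ===== CLAIM (what is proved, stated in full; the proofs are below) =====
def Claim_equal_pick_best_analysis : Prop := ∀ (analyses : List (List (String × String))), Dom_pick_best_analysis analyses → Spec_pick_best_analysis analyses (pick_best_analysis analyses)

-- ===== LEMMAS AND PROOFS =====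

-- rank class i of a list
def pvFi (i : Nat) (z : List (List (String × String))) : List (List (String × String)) :=
  z.filter (fun a => decide (pvRank a = i))

-- the winning (least inhabited) rank class; 3 = fallback
def pvW (z : List (List (String × String))) : Nat :=
  if pvFi 0 z ≠ [] then 0 else if pvFi 1 z ≠ [] then 1 else if pvFi 2 z ≠ [] then 2 else 3

lemma pvRank_le (a : List (String × String)) : pvRank a ≤ 3 := by
  unfold pvRank; split_ifs <;> omega

lemma pv_sw_iff (s p : String) : PySem.Str.startswith s p = true ↔ p.toList <+: s.toList := by
  simp [PySem.Chars.startswith_iff]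

-- a string cannot start with two incomparable prefixes at once
lemma pv_prefnot {s p q : List Char} (h1 : p <+: s) (hpq : ¬ p <+: q) (hqp : ¬ q <+: p) :
    ¬ q <+: s := fun h2 => (List.prefix_or_prefix_of_prefix h1 h2).elim hpq hqp

-- A's three startswith tests are exactly the three rank classes of B
lemma pv_sw_rank (a : List (String × String)) :
    (PySem.Str.startswith (pvGetD a "source" "") "local:mistral-tools/" = decide (pvRank a = 0))
    ∧ (PySem.Str.startswith (pvGetD a "source" "") "claude" = decide (pvRank a = 1))
    ∧ (PySem.Str.startswith (pvGetD a "source" "") "local:claude/" = decide (pvRank a = 2)) := by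
  by_cases h0 : "local:mistral-tools/".toList <+: (pvGetD a "source" "").toList
  · have h1 := pv_prefnot h0 (p := "local:mistral-tools/".toList) (q := "claude".toList) (by decide) (by decide)
    have h2 := pv_prefnot h0 (q := "local:claude/".toList) (by decide) (by decide)
    have b0 : PySem.Str.startswith (pvGetD a "source" "") "local:mistral-tools/" = true := (pv_sw_iff _ _).mpr h0
    have b1 : PySem.Str.startswith (pvGetD a "source" "") "claude" = false :=
      Bool.eq_false_iff.mpr (fun hb => h1 ((pv_sw_iff _ _).mp hb))
    have b2 : PySem.Str.startswith (pvGetD a "source" "") "local:claude/" = false :=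
      Bool.eq_false_iff.mpr (fun hb => h2 ((pv_sw_iff _ _).mp hb))
    refine ⟨?_, ?_, ?_⟩ <;> simp only [pvRank, b0, b1, b2] <;> decide
  · have b0 : PySem.Str.startswith (pvGetD a "source" "") "local:mistral-tools/" = false :=
      Bool.eq_false_iff.mpr (fun hb => h0 ((pv_sw_iff _ _).mp hb))
    by_cases h1 : "claude".toList <+: (pvGetD a "source" "").toList
    · have h2 := pv_prefnot h1 (q := "local:claude/".toList) (by decide) (by decide)
      have b1 : PySem.Str.startswith (pvGetD a "source" "") "claude" = true := (pv_sw_iff _ _).mpr h1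
      have b2 : PySem.Str.startswith (pvGetD a "source" "") "local:claude/" = false :=
        Bool.eq_false_iff.mpr (fun hb => h2 ((pv_sw_iff _ _).mp hb))
      refine ⟨?_, ?_, ?_⟩ <;> simp only [pvRank, b0, b1, b2] <;> decide
    · have b1 : PySem.Str.startswith (pvGetD a "source" "") "claude" = false :=
        Bool.eq_false_iff.mpr (fun hb => h1 ((pv_sw_iff _ _).mp hb))
      by_cases h2 : "local:claude/".toList <+: (pvGetD a "source" "").toList
      · have b2 : PySem.Str.startswith (pvGetD a "source" "") "local:claude/" = true := (pv_sw_iff _ _).mpr h2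
        refine ⟨?_, ?_, ?_⟩ <;> simp only [pvRank, b0, b1, b2] <;> decide
      · have b2 : PySem.Str.startswith (pvGetD a "source" "") "local:claude/" = false :=
          Bool.eq_false_iff.mpr (fun hb => h2 ((pv_sw_iff _ _).mp hb))
        refine ⟨?_, ?_, ?_⟩ <;> simp only [pvRank, b0, b1, b2] <;> decide

lemma pvFi_append (i : Nat) (xs : List (List (String × String))) (y : List (String × String)) :
    pvFi i (xs ++ [y]) = pvFi i xs ++ (if pvRank y = i then [y] else []) := by
  simp only [pvFi, List.filter_append, List.filter_cons, List.filter_nil]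
  split_ifs with h <;> simp_all

lemma pvW_eq (z : List (List (String × String))) (j : Nat) (hj : j ≤ 3)
    (hne : pvFi j z ≠ []) (hmin : ∀ i, i < j → pvFi i z = []) : pvW z = j := by
  unfold pvW
  split_ifs with h0 h1 h2
  · rcases Nat.eq_zero_or_pos j with h | h
    · omega
    · exact absurd (hmin 0 h) h0
  · by_cases hj1 : j ≤ 1
    · interval_cases j <;> simp_all
    · exact absurd (hmin 1 (by omega)) h1
  · by_cases hj2 : j ≤ 2
    · interval_cases j <;> simp_all
    · exact absurd (hmin 2 (by omega)) h2
  · interval_cases j <;> simp_all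

lemma pvW_min (z : List (List (String × String))) {i : Nat} (h : i < pvW z) : pvFi i z = [] := by
  unfold pvW at h
  split_ifs at h with h0 h1 h2
  · omega
  · interval_cases i
    simpa using h0
  · interval_cases i
    · simpa using h0
    · simpa using h1
  · interval_cases i
    · simpa using h0
    · simpa using h1
    · simpa using h2

lemma pvW_le (z : List (List (String × String))) : pvW z ≤ 3 := by
  unfold pvW; split_ifs <;> omega

lemma pvFi3_of_all_empty (z : List (List (String × String)))
    (h0 : pvFi 0 z = []) (h1 : pvFi 1 z = []) (h2 : pvFi 2 z = []) : pvFi 3 z = z := by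
  apply List.filter_eq_self.mpr
  intro a ha
  have r3 := pvRank_le a
  have e0 := List.filter_eq_nil_iff.mp h0 a ha
  have e1 := List.filter_eq_nil_iff.mp h1 a ha
  have e2 := List.filter_eq_nil_iff.mp h2 a ha
  simp at e0 e1 e2 ⊢
  omega

lemma pvW_ne (z : List (List (String × String))) (hz : z ≠ []) : pvFi (pvW z) z ≠ [] := by
  unfold pvW
  split_ifs with h0 h1 h2 <;> try assumption
  rw [pvFi3_of_all_empty z (by simpa using h0) (by simpa using h1) (by simpa using h2)]
  exact hz

lemma pv_getLast?_cons {α : Type} (a : α) (l : List α) (h : l ≠ []) :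
    (a :: l).getLast? = l.getLast? := by
  cases l with
  | nil => simp at h
  | cons u t => exact List.getLast?_cons_cons ..

lemma pv_exists_getLast {α : Type} (l : List α) (h : l ≠ []) : ∃ b, l.getLast? = some b := by
  cases e : l.getLast? with
  | some b => exact ⟨b, rfl⟩
  | none => exact absurd (List.getLast?_eq_none_iff.mp e) h

lemma pv_insertBy_ne_nil (key : List (String × String) → String) (y : List (String × String))
    (l : List (List (String × String))) :
    PySem.List.insertBy (fun a b => decide (key a < key b)) y l ≠ [] := by
  cases l with
  | nil => simp [PySem.List.insertBy]
  | cons h t => simp only [PySem.List.insertBy]; split <;> simp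

-- inserting y into a key-sorted list: the last element becomes y exactly when key last ≤ key y
lemma pv_lastIns (key : List (String × String) → String) (y : List (String × String))
    (l : List (List (String × String))) (hl : l.Pairwise (fun a b => key a ≤ key b)) :
    (PySem.List.insertBy (fun a b => decide (key a < key b)) y l).getLast?
      = some (match l.getLast? with
              | none => y
              | some b => if key b ≤ key y then y else b) := by
  induction l with
  | nil => simp [PySem.List.insertBy]
  | cons h t ih =>
    rw [List.pairwise_cons] at hl
    obtain ⟨hh, ht⟩ := hl
    simp only [PySem.List.insertBy]
    split_ifs with hc
    · have hy : key y < key h := of_decide_eq_true hc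
      rw [List.getLast?_cons_cons]
      obtain ⟨b, hb⟩ := pv_exists_getLast (h :: t) (by simp)
      have hbmem : b ∈ h :: t := List.mem_of_getLast? hb
      have hhb : key h ≤ key b := by
        rcases List.mem_cons.mp hbmem with e | e
        · exact e ▸ le_refl _
        · exact hh b e
      have hno : ¬ key b ≤ key y := not_le.mpr (lt_of_lt_of_le hy hhb)
      rw [hb]
      simp [hno]
    · have hy : key h ≤ key y := le_of_not_gt (by simpa using hc)
      cases t with
      | nil => simp [PySem.List.insertBy, hy]
      | cons u t' =>
        rw [pv_getLast?_cons h _ (pv_insertBy_ne_nil key y (u :: t')), ih ht,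
          List.getLast?_cons_cons]

-- the [-1] of Python's stable sort, after appending one element
lemma pv_sortedLast (key : List (String × String) → String)
    (cs : List (List (String × String))) (y : List (String × String)) :
    (PySem.List.sorted (cs ++ [y]) key).getLast?
      = some (match (PySem.List.sorted cs key).getLast? with
              | none => y
              | some b => if key b ≤ key y then y else b) := by
  rw [PySem.List.sorted_eq_foldl_insertBy, List.foldl_append]
  simp only [List.foldl_cons, List.foldl_nil]
  rw [← PySem.List.sorted_eq_foldl_insertBy]
  exact pv_lastIns key y _ (PySem.List.sorted_pairwise cs key)

-- A characterised: the last of the stable sort of the winning rank class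
lemma pv_charA (z : List (List (String × String))) (hz : z ≠ []) :
    pick_best_analysis z
      = (PySem.List.sorted (pvFi (pvW z) z) (fun a => pvGetD a "createdAt" "")).getLast? := by
  have e0 : z.filter (fun a => PySem.Str.startswith (pvGetD a "source" "") "local:mistral-tools/") = pvFi 0 z :=
    List.filter_congr (fun a _ => (pv_sw_rank a).1)
  have e1 : z.filter (fun a => PySem.Str.startswith (pvGetD a "source" "") "claude") = pvFi 1 z :=
    List.filter_congr (fun a _ => (pv_sw_rank a).2.1)
  have e2 : z.filter (fun a => PySem.Str.startswith (pvGetD a "source" "") "local:claude/") = pvFi 2 z :=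
    List.filter_congr (fun a _ => (pv_sw_rank a).2.2)
  simp only [pick_best_analysis, if_neg hz, pickLoopA, e0, e1, e2]
  split_ifs with h0 h1 h2
  · rw [pvW_eq z 3 (le_refl 3) (by rw [pvFi3_of_all_empty z h0 h1 h2]; exact hz)
      (fun i hi => by interval_cases i <;> assumption), pvFi3_of_all_empty z h0 h1 h2]
  · rw [pvW_eq z 2 (by omega) h2 (fun i hi => by interval_cases i <;> assumption)]
  · rw [pvW_eq z 1 (by omega) h1 (fun i hi => by interval_cases i; assumption)]
  · rw [pvW_eq z 0 (by omega) h0 (fun i hi => by omega)]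

lemma pv_baseA (y : List (String × String)) : pick_best_analysis [y] = some y := by
  rw [pv_charA [y] (by simp)]
  rw [pvW_eq [y] (pvRank y) (pvRank_le y) (by simp [pvFi]) (fun i hi => by simp [pvFi]; omega)]
  rw [show pvFi (pvRank y) [y] = [y] by simp [pvFi]]
  rfl

-- A obeys B's loop step
lemma pv_stepA (xs : List (List (String × String))) (y : List (String × String)) (hxs : xs ≠ []) :
    pick_best_analysis (xs ++ [y]) = pvStep (pick_best_analysis xs) y := by
  rw [pv_charA xs hxs, pv_charA (xs ++ [y]) (by simp)]
  have hjle := pvW_le xs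
  have hne := pvW_ne xs hxs
  obtain ⟨b, hb⟩ := pv_exists_getLast (PySem.List.sorted (pvFi (pvW xs) xs) (fun a => pvGetD a "createdAt" ""))
    (by rw [Ne, PySem.List.sorted_eq_nil_iff]; exact hne)
  have hbmem : b ∈ pvFi (pvW xs) xs :=
    (PySem.List.mem_sorted _ _ _ _).mp (List.mem_of_getLast? hb)
  have hrb : pvRank b = pvW xs := by
    have := (List.mem_filter.mp hbmem).2
    simpa using this
  rw [hb]
  rcases lt_trichotomy (pvRank y) (pvW xs) with hk | hk | hk
  · have hw : pvW (xs ++ [y]) = pvRank y := by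
      refine pvW_eq _ _ (pvRank_le y) ?_ ?_
      · rw [pvFi_append, pvW_min xs hk, if_pos rfl]; simp
      · intro i hi
        rw [pvFi_append, pvW_min xs (lt_trans hi hk), if_neg (by omega)]
        simp
    rw [hw, show pvFi (pvRank y) (xs ++ [y]) = [y] by
      rw [pvFi_append, pvW_min xs hk, if_pos rfl]; simp]
    have : pvStep (some b) y = some y := by
      simp only [pvStep, if_pos (Or.inl (hrb ▸ hk))]
    rw [this]
    rfl
  · have hw : pvW (xs ++ [y]) = pvW xs := by
      refine pvW_eq _ _ hjle ?_ ?_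
      · rw [pvFi_append, if_pos hk]; simp
      · intro i hi
        rw [pvFi_append, pvW_min xs hi, if_neg (by omega)]
        simp
    rw [hw, pvFi_append, if_pos hk, pv_sortedLast, hb]
    simp only [pvStep]
    by_cases hcle : pvGetD b "createdAt" "" ≤ pvGetD y "createdAt" ""
    · rw [if_pos hcle, if_pos (Or.inr ⟨hrb ▸ hk, hcle⟩)]
    · rw [if_neg hcle, if_neg ?_]
      rintro (h | ⟨-, h⟩)
      · omega
      · exact hcle h
  · have hw : pvW (xs ++ [y]) = pvW xs := by
      refine pvW_eq _ _ hjle ?_ ?_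
      · rw [pvFi_append, if_neg (by omega), List.append_nil]; exact hne
      · intro i hi
        rw [pvFi_append, pvW_min xs hi, if_neg (by omega)]
        simp
    rw [hw, pvFi_append, if_neg (by omega), List.append_nil, hb]
    simp only [pvStep]
    rw [if_neg ?_]
    rintro (h | ⟨h, -⟩) <;> omega

lemma pv_main (analyses : List (List (String × String))) :
    pick_best_analysis analyses = pick_best_analysis_alt analyses := by
  induction analyses using List.reverseRecOn with
  | nil => rfl
  | append_singleton xs y ih =>
    unfold pick_best_analysis_alt at ih ⊢
    rw [List.foldl_append]
    cases xs with
    | nil => simpa using pv_baseA y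
    | cons h t =>
      rw [pv_stepA _ _ (by simp), ih]
      rfl

-- ===== VERDICT (by name: the statement is the Claim_ definition above) =====
theorem pick_best_analysis_spec : Claim_equal_pick_best_analysis := by
  intro analyses _
  unfold Spec_pick_best_analysis
  exact pv_main analyses
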